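-- pv_equiv track=rewrite | github.com/bartlomiejduda/ReverseBox | reversebox/hash/hash_ap.py | calculate_ap_hash_from_string
-- ===== SOURCE A (Python) =====
-- def calculate_ap_hash_from_string(input_string: str) -> int:
--     hash_value = 0xAAAAAAAA
--     i = 0
--     for char in input_string:
--         if i & 1 == 0:
--             hash_value ^= (hash_value << 7) ^ ord(char) * (hash_value >> 3)
--         else:
--             hash_value ^= ~((hash_value << 11) + ord(char) ^ (hash_value >> 5))
--         i += 1
--     return hash_value & 0xFFFFFFFF
-- ===== SOURCE B (Python) =====
-- def calculate_ap_hash_from_string(input_string: str) -> int: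
--     hash_value = 0xAAAAAAAA
--     n = len(input_string)
--     for k in range(0, n - 1, 2):
--         hash_value ^= (hash_value << 7) ^ ord(input_string[k]) * (hash_value >> 3)
--         hash_value ^= ~((hash_value << 11) + ord(input_string[k + 1]) ^ (hash_value >> 5))
--     if n & 1:
--         hash_value ^= (hash_value << 7) ^ ord(input_string[-1]) * (hash_value >> 3)
--     return hash_value & 0xFFFFFFFF
-- ===== Notes on version B (the rewrite author's own statement) =====
-- stated objective: alternative
-- what changed: B drops the running index and its parity test: it walks the string two characters per step, applying the even-index and odd-index mixing formulas once each per step, with a single trailing even-index update when the length is odd.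
import Mathlib
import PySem

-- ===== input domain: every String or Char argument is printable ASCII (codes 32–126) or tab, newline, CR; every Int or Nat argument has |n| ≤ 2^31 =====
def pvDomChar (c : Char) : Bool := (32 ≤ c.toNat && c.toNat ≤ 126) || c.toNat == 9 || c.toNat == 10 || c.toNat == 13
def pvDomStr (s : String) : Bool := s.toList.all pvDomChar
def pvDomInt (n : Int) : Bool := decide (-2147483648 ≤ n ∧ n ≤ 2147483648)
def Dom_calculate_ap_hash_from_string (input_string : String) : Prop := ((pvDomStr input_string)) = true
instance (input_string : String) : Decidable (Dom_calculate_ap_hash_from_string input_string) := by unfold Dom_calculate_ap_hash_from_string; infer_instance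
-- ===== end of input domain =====

-- B replaces A's per-character loop with running index parity by a two-characters-per-step
-- walk (even formula then odd formula each step, trailing even-formula update for odd length);
-- objective: alternative decomposition, same cost.

-- ===== PORT A =====
-- loop body of A: state is (hash_value, i)
def apStepA (st : Int × Int) (c : Char) : Int × Int :=
  let h := st.1
  let i := st.2
  if PySem.Int.band i 1 = 0 then
    (PySem.Int.bxor h (PySem.Int.bxor (h <<< 7) ((c.toNat : Int) * (h >>> 3))), i + 1)
  else
    (PySem.Int.bxor h (Int.not (PySem.Int.bxor ((h <<< 11) + (c.toNat : Int)) (h >>> 5))), i + 1)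

def calculate_ap_hash_from_string (input_string : String) : Int :=
  PySem.Int.band (input_string.toList.foldl apStepA (0xAAAAAAAA, 0)).1 0xFFFFFFFF

-- ===== PORT B =====
-- the even-index update of B's loop body
def apEven (h : Int) (c : Char) : Int :=
  PySem.Int.bxor h (PySem.Int.bxor (h <<< 7) ((c.toNat : Int) * (h >>> 3)))

-- the odd-index update of B's loop body
def apOdd (h : Int) (c : Char) : Int :=
  PySem.Int.bxor h (Int.not (PySem.Int.bxor ((h <<< 11) + (c.toNat : Int)) (h >>> 5)))

-- B's pairwise walk: two characters per step, trailing single character gets the even formula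
def apPairs (h : Int) : List Char → Int
  | [] => h
  | [c] => apEven h c
  | c1 :: c2 :: rest => apPairs (apOdd (apEven h c1) c2) rest

def calculate_ap_hash_from_string_alt (input_string : String) : Int :=
  PySem.Int.band (apPairs 0xAAAAAAAA input_string.toList) 0xFFFFFFFF

-- ===== PRECONDITION & SPEC =====
def Spec_calculate_ap_hash_from_string (input_string : String) (out : Int) : Prop := out = calculate_ap_hash_from_string_alt input_string
instance (input_string : String) (out : Int) : Decidable (Spec_calculate_ap_hash_from_string input_string out) := by unfold Spec_calculate_ap_hash_from_string; infer_instance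

-- ===== CLAIM (what is proved, stated in full; the proofs are below) =====
def Claim_equal_calculate_ap_hash_from_string : Prop := ∀ (input_string : String), Dom_calculate_ap_hash_from_string input_string → Spec_calculate_ap_hash_from_string input_string (calculate_ap_hash_from_string input_string)

-- ===== LEMMAS AND PROOFS =====

lemma band_even (m : Int) : PySem.Int.band (2 * m) 1 = 0 := by
  rw [PySem.Int.band_one, PySem.Int.mod_eq_zero_iff_dvd]
  exact ⟨m, rfl⟩

lemma band_odd (m : Int) : PySem.Int.band (2 * m + 1) 1 = 1 := by
  rw [PySem.Int.band_one]
  rcases PySem.Int.mod_two_eq (2 * m + 1) with h | h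
  · rw [PySem.Int.mod_eq_zero_iff_dvd] at h; omega
  · exact h

-- invariant: starting from an even index, A's fold computes B's pairwise walk
lemma loop_eq : ∀ (l : List Char) (h m : Int),
    (l.foldl apStepA (h, 2 * m)).1 = apPairs h l
  | [], h, m => rfl
  | [c], h, m => by
      simp [List.foldl, apStepA, apPairs, apEven, band_even]
  | c1 :: c2 :: rest, h, m => by
      have ih := loop_eq rest (apOdd (apEven h c1) c2) (m + 1)
      simp only [List.foldl, apStepA, band_even]
      norm_num [apEven, apOdd] at ih ⊢
      rw [show (2 : Int) * m + 1 + 1 = 2 * (m + 1) by ring]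
      have hne : ¬ (PySem.Int.band (2 * m + 1) 1 = 0) := by rw [band_odd]; norm_num
      rw [if_neg hne]
      exact ih

-- ===== VERDICT (by name: the statement is the Claim_ definition above) =====
theorem calculate_ap_hash_from_string_spec : Claim_equal_calculate_ap_hash_from_string := by
  intro s _
  unfold Spec_calculate_ap_hash_from_string calculate_ap_hash_from_string calculate_ap_hash_from_string_alt
  have h := loop_eq s.toList 0xAAAAAAAA 0
  norm_num at h
  rw [h]
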